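-- pv_equiv track=rewrite | github.com/burd5/codewars_python | min_max_min.py | min_min_max
-- ===== SOURCE A (Python) =====
-- def min_min_max(arr):
--     minimum = min(arr)
--     maximum = max(arr)
--     mini = 0
--     for i in range(len(arr)):
--         temp = minimum + i
--         if temp not in arr:
--             mini = temp
--             break
--     return [minimum, mini, maximum]
-- ===== SOURCE B (Python) =====
-- def min_min_max(arr):
--     minimum = min(arr)
--     maximum = max(arr)
--     expected = minimum
--     mini = None
--     for v in sorted(arr):
--         if v == expected:
--             expected += 1
--         elif v > expected:
--             mini = expected
--             break
--     if mini is None: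
--         mini = 0 if expected - minimum == len(arr) else expected
--     return [minimum, mini, maximum]
-- ===== Notes on version B (the rewrite author's own statement) =====
-- stated objective: alternative
-- what changed: Replaced the per-candidate linear membership scans (temp not in arr, worst-case quadratic) by one sort followed by a single duplicate-skipping walk with an expected counter; the loop-exhausted case returns 0 when the array is exactly a consecutive run and minimum+distinct otherwise, matching A exactly.
import Mathlib
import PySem

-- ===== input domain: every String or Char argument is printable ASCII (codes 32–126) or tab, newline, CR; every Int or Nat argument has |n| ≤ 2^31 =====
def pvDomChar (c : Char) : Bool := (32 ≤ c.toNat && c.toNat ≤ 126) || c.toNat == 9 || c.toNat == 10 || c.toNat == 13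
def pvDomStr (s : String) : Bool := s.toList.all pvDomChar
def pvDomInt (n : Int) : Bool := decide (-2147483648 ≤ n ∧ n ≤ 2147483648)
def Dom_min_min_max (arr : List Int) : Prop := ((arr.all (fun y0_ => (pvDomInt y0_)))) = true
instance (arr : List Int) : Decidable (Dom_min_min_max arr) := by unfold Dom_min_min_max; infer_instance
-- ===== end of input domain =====

-- B replaces A's quadratic "minimum+i not in arr" membership scans by one sort plus a single
-- duplicate-skipping walk with an expected counter (objective: alternative algorithm, same result).

-- ===== PORT A =====
-- the for-loop over range(len(arr)) with break; returns 0 if the loop exhausts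
def pvLoopA (arr : List Int) (minimum : Int) : List Int → Int
  | [] => 0
  | i :: rest =>
      if (minimum + i) ∈ arr then pvLoopA arr minimum rest else minimum + i

def min_min_max (arr : List Int) : List Int :=
  match PySem.List.min? arr (fun x => x), PySem.List.max? arr (fun x => x) with
  | some minimum, some maximum =>
      [minimum, pvLoopA arr minimum (PySem.List.pyRange 0 (arr.length : Int) 1), maximum]
  | _, _ => []  -- unreachable: min/max raise ValueError on [], excluded by Pre_

-- ===== PORT B =====
-- the for-loop over sorted(arr): (found gap (break), final expected)
def pvWalk : List Int → Int → Option Int × Int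
  | [], e => (none, e)
  | v :: rest, e =>
      if v = e then pvWalk rest (e + 1)
      else if e < v then (some e, e)
      else pvWalk rest e

def min_min_max_alt (arr : List Int) : List Int :=
  match PySem.List.min? arr (fun x => x) with
  | none => []  -- unreachable: min raises ValueError on [], excluded by Pre_
  | some minimum =>
      match PySem.List.max? arr (fun x => x) with
      | none => []
      | some maximum =>
          let w := pvWalk (PySem.List.sorted arr (fun x => x) false) minimum
          let mini : Int :=
            match w.1 with
            | some g => g
            | none => if w.2 - minimum = (arr.length : Int) then 0 else w.2
          [minimum, mini, maximum]

-- ===== PRECONDITION & SPEC =====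
-- Pre_ excludes only the empty list, on which A raises ValueError (min of empty sequence).
def Pre_min_min_max (arr : List Int) : Prop := arr ≠ []
instance (arr : List Int) : Decidable (Pre_min_min_max arr) := by unfold Pre_min_min_max; infer_instance
def pvWitness_min_min_max : List Int := [0]
def Spec_min_min_max (arr : List Int) (out : List Int) : Prop := out = min_min_max_alt arr
instance (arr : List Int) (out : List Int) : Decidable (Spec_min_min_max arr out) := by unfold Spec_min_min_max; infer_instance

-- ===== CLAIM (what is proved, stated in full; the proofs are below) =====
def Claim_equal_min_min_max : Prop := ∀ (arr : List Int), Dom_min_min_max arr → Pre_min_min_max arr → Spec_min_min_max arr (min_min_max arr)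

-- ===== LEMMAS AND PROOFS =====

-- counting: a chain minimum, minimum+1, …, minimum+c-1 of members of arr has c ≤ arr.length
theorem pv_chain_le (arr : List Int) (m : Int) (c : Nat)
    (h : ∀ j : Nat, j < c → m + (j : Int) ∈ arr) : c ≤ arr.length := by
  have hnd : ((List.range c).map (fun j : Nat => m + (j : Int))).Nodup := by
    refine List.Nodup.map ?_ (List.nodup_range)
    intro a b hab
    have hab' : m + (a : Int) = m + (b : Int) := hab
    omega
  have hsub : ((List.range c).map (fun j : Nat => m + (j : Int))) ⊆ arr := by
    intro y hy
    simp only [List.mem_map, List.mem_range] at hy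
    obtain ⟨j, hj, rfl⟩ := hy
    exact h j hj
  have := (List.subperm_of_subset hnd hsub).length_le
  simpa using this

-- counting with one extra member above the chain
theorem pv_chain_lt (arr : List Int) (m : Int) (c : Nat) (x : Int)
    (h : ∀ j : Nat, j < c → m + (j : Int) ∈ arr) (hx : x ∈ arr) (hgt : m + (c : Int) ≤ x) :
    c < arr.length := by
  have hnd : (x :: (List.range c).map (fun j : Nat => m + (j : Int))).Nodup := by
    refine List.nodup_cons.2 ⟨?_, ?_⟩
    · intro hmem
      simp only [List.mem_map, List.mem_range] at hmem
      obtain ⟨j, hj, hje⟩ := hmem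
      have hje' : m + (j : Int) = x := hje
      omega
    · refine List.Nodup.map ?_ (List.nodup_range)
      intro a b hab
      have hab' : m + (a : Int) = m + (b : Int) := hab
      omega
  have hsub : (x :: (List.range c).map (fun j : Nat => m + (j : Int))) ⊆ arr := by
    intro y hy
    rcases List.mem_cons.1 hy with rfl | hy
    · exact hx
    · simp only [List.mem_map, List.mem_range] at hy
      obtain ⟨j, hj, rfl⟩ := hy
      exact h j hj
  have := (List.subperm_of_subset hnd hsub).length_le
  simpa using this

theorem pv_exists_gap (arr : List Int) (m : Int) : ∃ j : Nat, (m + (j : Int)) ∉ arr := by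
  by_contra h
  push Not at h
  have := pv_chain_le arr m (arr.length + 1) (fun j _ => h j)
  omega

-- A's loop over range(i0, i0+cnt) given the first gap index k (k ≥ i0)
theorem pvLoopA_spec (arr : List Int) (m : Int) (k : Nat)
    (hmem : ∀ j : Nat, j < k → m + (j : Int) ∈ arr) (hgap : (m + (k : Int)) ∉ arr) :
    ∀ (cnt i0 : Nat), i0 ≤ k →
      pvLoopA arr m (PySem.List.pyRange (i0 : Int) ((i0 + cnt : Nat) : Int) 1)
        = if k < i0 + cnt then m + (k : Int) else 0 := by
  intro cnt
  induction cnt with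
  | zero =>
      intro i0 hi0
      have hnil : PySem.List.pyRange (i0 : Int) ((i0 + 0 : Nat) : Int) 1 = [] :=
        PySem.List.pyRange_one_eq_nil (by omega)
      rw [hnil]
      simp [pvLoopA]
      omega
  | succ cnt ih =>
      intro i0 hi0
      have hcons : PySem.List.pyRange (i0 : Int) ((i0 + (cnt + 1) : Nat) : Int) 1
          = (i0 : Int) :: PySem.List.pyRange ((i0 : Int) + 1) ((i0 + (cnt + 1) : Nat) : Int) 1 :=
        PySem.List.pyRange_one_cons (by push_cast; omega)
      rw [hcons]
      by_cases hmemi : (m + (i0 : Int)) ∈ arr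
      · have hne : i0 ≠ k := by
          intro h; exact hgap (h ▸ hmemi)
        have hi1 : i0 + 1 ≤ k := by omega
        have harg : ((i0 : Int) + 1) = (((i0 + 1 : Nat)) : Int) := by push_cast; omega
        have harg2 : ((i0 + (cnt + 1) : Nat) : Int) = (((i0 + 1) + cnt : Nat) : Int) := by
          push_cast; omega
        simp only [pvLoopA, if_pos hmemi]
        rw [harg, harg2, ih (i0 + 1) hi1]
        have h3 : i0 + 1 + cnt = i0 + (cnt + 1) := by omega
        rw [h3]
      · have hk : k ≤ i0 := by
          by_contra hlt
          exact hmemi (hmem i0 (by omega))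
        have hek : k = i0 := by omega
        simp only [pvLoopA, if_neg hmemi]
        subst hek
        simp

-- B's walk over a sorted list given the first gap index k relative to the current list
theorem pvWalk_spec : ∀ (s : List Int) (e : Int), s.Pairwise (· ≤ ·) →
    ∀ (k : Nat), (∀ j : Nat, j < k → e + (j : Int) ∈ s) → (e + (k : Int)) ∉ s →
    pvWalk s e = if (∃ x ∈ s, e + (k : Int) < x) then (some (e + (k : Int)), e + (k : Int))
                 else (none, e + (k : Int)) := by
  intro s
  induction s with
  | nil =>
      intro e _ k hmem hgap
      have hk : k = 0 := by
        by_contra h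
        exact absurd (hmem 0 (by omega)) (by simp)
      subst hk
      simp [pvWalk]
  | cons v rest ih =>
      intro e hpw k hmem hgap
      have hv : ∀ x ∈ rest, v ≤ x := by
        intro x hx
        exact (List.pairwise_cons.1 hpw).1 x hx
      have hpr : rest.Pairwise (· ≤ ·) := (List.pairwise_cons.1 hpw).2
      by_cases hve : v = e
      · subst hve
        have hk1 : 1 ≤ k := by
          by_contra h
          have hk0 : k = 0 := by omega
          apply hgap
          rw [hk0]
          simp
        obtain ⟨k', rfl⟩ : ∃ k', k = k' + 1 := ⟨k - 1, by omega⟩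
        have hmem' : ∀ j : Nat, j < k' → (v + 1) + (j : Int) ∈ rest := by
          intro j hj
          have h1 : v + ((j + 1 : Nat) : Int) ∈ v :: rest := hmem (j + 1) (by omega)
          have h2 : (v + 1) + (j : Int) = v + ((j + 1 : Nat) : Int) := by push_cast; ring
          rw [h2]
          rcases List.mem_cons.1 h1 with heq | hr
          · exfalso; omega
          · exact hr
        have hgap' : ((v + 1) + (k' : Int)) ∉ rest := by
          intro hr
          apply hgap
          have h2 : v + ((k' + 1 : Nat) : Int) = (v + 1) + (k' : Int) := by push_cast; ring
          rw [h2]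
          exact List.mem_cons_of_mem _ hr
        have heq : (v + 1) + (k' : Int) = v + ((k' + 1 : Nat) : Int) := by push_cast; ring
        have hstep : pvWalk (v :: rest) v = pvWalk rest (v + 1) := by
          simp [pvWalk]
        rw [hstep, ih (v + 1) hpr k' hmem' hgap', ← heq]
        have hiff : (∃ x ∈ rest, (v + 1) + (k' : Int) < x) ↔
            (∃ x ∈ v :: rest, (v + 1) + (k' : Int) < x) := by
          constructor
          · rintro ⟨x, hx, hlt⟩; exact ⟨x, List.mem_cons_of_mem _ hx, hlt⟩
          · rintro ⟨x, hx, hlt⟩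
            rcases List.mem_cons.1 hx with rfl | hr
            · exfalso; omega
            · exact ⟨x, hr, hlt⟩
        by_cases hex : ∃ x ∈ rest, (v + 1) + (k' : Int) < x
        · rw [if_pos hex, if_pos (hiff.1 hex)]
        · rw [if_neg hex, if_neg (fun h => hex (hiff.2 h))]
      · by_cases hlt : e < v
        · have hk0 : k = 0 := by
            by_contra h
            have he : e ∈ v :: rest := by
              have := hmem 0 (by omega)
              simpa using this
            rcases List.mem_cons.1 he with rfl | hr
            · omega
            · have := hv e hr; omega
          subst hk0
          have hex : ∃ x ∈ v :: rest, e + ((0 : Nat) : Int) < x := by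
            refine ⟨v, List.mem_cons_self, ?_⟩
            simpa using hlt
          have hstep : pvWalk (v :: rest) e = (some e, e) := by
            simp [pvWalk, hve, hlt]
          rw [hstep, if_pos hex]
          simp
        · have hvlt : v < e := by
            rcases lt_or_ge v e with h | h
            · exact h
            · exfalso; exact hve (le_antisymm (by omega) h)
          have hmem' : ∀ j : Nat, j < k → e + (j : Int) ∈ rest := by
            intro j hj
            rcases List.mem_cons.1 (hmem j hj) with heq | hr
            · exfalso; omega
            · exact hr
          have hgap' : (e + (k : Int)) ∉ rest := fun hr => hgap (List.mem_cons_of_mem _ hr)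
          have hiff : (∃ x ∈ rest, e + (k : Int) < x) ↔ (∃ x ∈ v :: rest, e + (k : Int) < x) := by
            constructor
            · rintro ⟨x, hx, h⟩; exact ⟨x, List.mem_cons_of_mem _ hx, h⟩
            · rintro ⟨x, hx, h⟩
              rcases List.mem_cons.1 hx with rfl | hr
              · exfalso; omega
              · exact ⟨x, hr, h⟩
          have hstep : pvWalk (v :: rest) e = pvWalk rest e := by
            simp [pvWalk, hve, hlt]
          rw [hstep, ih e hpr k hmem' hgap']
          by_cases hex : ∃ x ∈ rest, e + (k : Int) < x
          · rw [if_pos hex, if_pos (hiff.1 hex)]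
          · rw [if_neg hex, if_neg (fun h => hex (hiff.2 h))]

-- ===== VERDICT (by name: the statement is the Claim_ definition above) =====
theorem min_min_max_spec : Claim_equal_min_min_max := by
  intro arr _hdom hpre
  unfold Spec_min_min_max
  -- min/max are some on a nonempty list
  obtain ⟨m, hmin⟩ : ∃ m, PySem.List.min? arr (fun x => x) = some m := by
    cases hmin : PySem.List.min? arr (fun x => x) with
    | none => exact absurd (PySem.List.min?_eq_none_iff arr (fun x => x) |>.1 hmin) hpre
    | some m => exact ⟨m, rfl⟩
  obtain ⟨M, hmax⟩ : ∃ M, PySem.List.max? arr (fun x => x) = some M := by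
    cases hmax : PySem.List.max? arr (fun x => x) with
    | none => exact absurd (PySem.List.max?_eq_none_iff arr (fun x => x) |>.1 hmax) hpre
    | some M => exact ⟨M, rfl⟩
  -- the first gap index k above m
  set k := Nat.find (pv_exists_gap arr m) with hk
  have hgap : (m + (k : Int)) ∉ arr := Nat.find_spec (pv_exists_gap arr m)
  have hmem : ∀ j : Nat, j < k → m + (j : Int) ∈ arr := by
    intro j hj
    have := Nat.find_min (pv_exists_gap arr m) hj
    exact not_not.1 this
  have hkle : k ≤ arr.length := pv_chain_le arr m k hmem
  -- A's middle value
  have hA : pvLoopA arr m (PySem.List.pyRange 0 (arr.length : Int) 1)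
      = if k < arr.length then m + (k : Int) else 0 := by
    have := pvLoopA_spec arr m k hmem hgap arr.length 0 (by omega)
    simpa using this
  -- B's walk
  set s := PySem.List.sorted arr (fun x => x) false with hs
  have hmem_s : ∀ x : Int, x ∈ s ↔ x ∈ arr := by
    intro x
    exact PySem.List.mem_sorted arr (fun y => y) false x
  have hpw : s.Pairwise (· ≤ ·) := by
    have := PySem.List.sorted_pairwise (xs := arr) (key := fun x : Int => x)
    simpa using this
  have hB : pvWalk s m = if (∃ x ∈ s, m + (k : Int) < x)
      then (some (m + (k : Int)), m + (k : Int)) else (none, m + (k : Int)) := by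
    refine pvWalk_spec s m hpw k ?_ ?_
    · intro j hj; exact (hmem_s _).2 (hmem j hj)
    · intro h; exact hgap ((hmem_s _).1 h)
  -- assemble both sides
  show min_min_max arr = min_min_max_alt arr
  rw [min_min_max, min_min_max_alt, hmin, hmax]
  by_cases hex : ∃ x ∈ s, m + (k : Int) < x
  · -- B breaks at the gap; it lies inside range(len(arr)) by counting
    have hB' : pvWalk s m = (some (m + (k : Int)), m + (k : Int)) := by rw [hB, if_pos hex]
    obtain ⟨x, hx, hxlt⟩ := hex
    have hklt : k < arr.length :=
      pv_chain_lt arr m k x hmem ((hmem_s x).1 hx) (le_of_lt hxlt)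
    simp only [hA, ← hs, hB', if_pos hklt]
  · have hB' : pvWalk s m = (none, m + (k : Int)) := by rw [hB, if_neg hex]
    simp only [hA, ← hs, hB']
    by_cases hkn : k = arr.length
    · have h1 : ¬ k < arr.length := by omega
      have h2 : m + (k : Int) - m = (arr.length : Int) := by omega
      rw [if_neg h1, if_pos h2]
    · have h1 : k < arr.length := by omega
      have h2 : ¬ (m + (k : Int) - m = (arr.length : Int)) := by omega
      rw [if_pos h1, if_neg h2]
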